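-- pv_equiv track=rewrite | github.com/leo-carrey/pendu | exo.py | sort_divisible_by_3
-- ===== SOURCE A (Python) =====
-- def sort_divisible_by_3(arr):
--     new_arr=[]
--     str_arr=[]
--     sep=' '
--     for i in arr:
--         if i%3 == 0:
--             new_arr.append(i)
--     for i in arr:
--         if i%3 != 0:
--             new_arr.append(i)
--     for i in new_arr:
--         str_arr.append(str(i))
--     str_arr=sep.join(str_arr)
--     return str_arr
-- ===== SOURCE B (Python) =====
-- def sort_divisible_by_3(arr):
--     return ' '.join(str(i) for i in sorted(arr, key=lambda i: i % 3 != 0))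
-- ===== Notes on version B (the rewrite author's own statement) =====
-- stated objective: idiomatic
-- what changed: Replaces the two explicit partition passes plus a stringify loop with a single stable sort on the boolean key (i % 3 != 0) and a join over a generator.
import Mathlib
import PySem

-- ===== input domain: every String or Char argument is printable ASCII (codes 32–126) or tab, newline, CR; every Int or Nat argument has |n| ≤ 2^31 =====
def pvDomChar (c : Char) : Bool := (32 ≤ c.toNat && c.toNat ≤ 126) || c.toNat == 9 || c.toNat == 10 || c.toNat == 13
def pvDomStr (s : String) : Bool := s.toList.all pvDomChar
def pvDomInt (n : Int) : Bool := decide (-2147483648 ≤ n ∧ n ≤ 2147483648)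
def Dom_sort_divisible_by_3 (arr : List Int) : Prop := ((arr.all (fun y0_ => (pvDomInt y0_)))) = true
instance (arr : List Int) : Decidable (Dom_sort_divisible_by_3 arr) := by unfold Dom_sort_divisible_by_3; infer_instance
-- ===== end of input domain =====

-- B replaces A's two partition passes and stringify loop by one stable sort on the boolean key (i % 3 != 0) plus a join (objective: idiomatic).
-- ===== PORT A =====
def sort_divisible_by_3 (arr : List Int) : String :=
  let new1 := arr.foldl (fun acc i => if PySem.Int.mod i 3 == 0 then acc ++ [i] else acc) []
  let new2 := arr.foldl (fun acc i => if PySem.Int.mod i 3 != 0 then acc ++ [i] else acc) new1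
  let strs := new2.foldl (fun acc i => acc ++ [PySem.Int.toStr i]) []
  PySem.Str.join " " strs

-- ===== PORT B =====
-- Python's bool key (i % 3 != 0) is ported as the Int 0/1 it compares as.
def sort_divisible_by_3_alt (arr : List Int) : String :=
  PySem.Str.join " "
    ((PySem.List.sorted arr (fun i => if PySem.Int.mod i 3 != 0 then (1 : Int) else 0)).map PySem.Int.toStr)

-- ===== PRECONDITION & SPEC =====
def Spec_sort_divisible_by_3 (arr : List Int) (out : String) : Prop := out = sort_divisible_by_3_alt arr
instance (arr : List Int) (out : String) : Decidable (Spec_sort_divisible_by_3 arr out) := by unfold Spec_sort_divisible_by_3; infer_instance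

-- ===== CLAIM (what is proved, stated in full; the proofs are below) =====
def Claim_equal_sort_divisible_by_3 : Prop := ∀ (arr : List Int), Dom_sort_divisible_by_3 arr → Spec_sort_divisible_by_3 arr (sort_divisible_by_3 arr)

-- ===== LEMMAS AND PROOFS =====

-- the sort key of B, and its comparison function inside PySem.List.sorted
def pvKey (i : Int) : Int := if PySem.Int.mod i 3 != 0 then 1 else 0

lemma pvKey_cases (i : Int) : pvKey i = 0 ∨ pvKey i = 1 := by
  unfold pvKey; split <;> simp

-- inserting an element with key 1 appends it at the end
lemma insert_one (x : Int) (hx : pvKey x = 1) :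
    ∀ l : List Int,
      PySem.List.insertBy (fun a b => decide (pvKey a < pvKey b)) x l = l ++ [x] := by
  intro l
  induction l with
  | nil => rfl
  | cons y ys ih =>
      have hy : ¬ pvKey x < pvKey y := by
        rcases pvKey_cases y with h | h <;> omega
      simp [PySem.List.insertBy, hy, ih]

-- inserting an element with key 0 lands right between the zeros and the ones
lemma insert_zero (x : Int) (hx : pvKey x = 0) :
    ∀ zs os : List Int, (∀ y ∈ zs, pvKey y = 0) → (∀ y ∈ os, pvKey y = 1) →
      PySem.List.insertBy (fun a b => decide (pvKey a < pvKey b)) x (zs ++ os) =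
        zs ++ x :: os := by
  intro zs
  induction zs with
  | nil =>
      intro os _ ho
      cases os with
      | nil => rfl
      | cons y ys =>
          have hy : pvKey x < pvKey y := by
            have := ho y (by simp); omega
          simp [PySem.List.insertBy, hy]
  | cons z zs ih =>
      intro os hz ho
      have hzz : ¬ pvKey x < pvKey z := by
        have := hz z (by simp); omega
      simp only [List.cons_append, PySem.List.insertBy, hzz, decide_eq_true_eq]
      exact congrArg (z :: ·) (ih os (fun y hy => hz y (by simp [hy])) ho)

-- the stable insertion-sort loop on a 0/1 key is the two-filter partition
lemma foldl_insert_partition :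
    ∀ (xs zs os : List Int), (∀ y ∈ zs, pvKey y = 0) → (∀ y ∈ os, pvKey y = 1) →
      xs.foldl (fun acc x => PySem.List.insertBy (fun a b => decide (pvKey a < pvKey b)) x acc)
          (zs ++ os) =
        (zs ++ xs.filter (fun i => PySem.Int.mod i 3 == 0)) ++
          (os ++ xs.filter (fun i => PySem.Int.mod i 3 != 0)) := by
  intro xs
  induction xs with
  | nil => intro zs os _ _; simp
  | cons x xs ih =>
      intro zs os hz ho
      rcases pvKey_cases x with hx | hx
      · have hp : (PySem.Int.mod x 3 == 0) = true := by
          unfold pvKey at hx; split at hx <;> simp_all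
        have h1 : PySem.List.insertBy (fun a b => decide (pvKey a < pvKey b)) x (zs ++ os) =
            (zs ++ [x]) ++ os := by
          rw [insert_zero x hx zs os hz ho]; simp
        simp only [List.foldl_cons, h1]
        rw [ih (zs ++ [x]) os
          (by intro y hy; rcases List.mem_append.1 hy with h | h
              · exact hz y h
              · simp at h; simpa [h] using hx) ho]
        have hq : (PySem.Int.mod x 3 != 0) = false := by simp only [bne, hp, Bool.not_true]
        simp only [List.filter_cons, hp, hq, if_true, if_false, Bool.false_eq_true]
        simp
      · have hp : (PySem.Int.mod x 3 == 0) = false := by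
          unfold pvKey at hx; split at hx <;> simp_all
        have h1 : PySem.List.insertBy (fun a b => decide (pvKey a < pvKey b)) x (zs ++ os) =
            zs ++ (os ++ [x]) := by
          rw [← List.append_assoc, insert_one x hx (zs ++ os)]
        simp only [List.foldl_cons, h1]
        rw [ih zs (os ++ [x]) hz
          (by intro y hy; rcases List.mem_append.1 hy with h | h
              · exact ho y h
              · simp at h; simpa [h] using hx)]
        have hq : (PySem.Int.mod x 3 != 0) = true := by simp only [bne, hp, Bool.not_false]
        simp only [List.filter_cons, hp, hq, if_true, if_false, Bool.false_eq_true]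
        simp

lemma sorted_key3 (arr : List Int) :
    PySem.List.sorted arr (fun i => if PySem.Int.mod i 3 != 0 then (1 : Int) else 0) =
      arr.filter (fun i => PySem.Int.mod i 3 == 0) ++
        arr.filter (fun i => PySem.Int.mod i 3 != 0) := by
  have h := foldl_insert_partition arr [] [] (by simp) (by simp)
  simpa [PySem.List.sorted_eq_foldl_insertBy, pvKey] using h


-- ===== VERDICT (by name: the statement is the Claim_ definition above) =====
theorem sort_divisible_by_3_spec : Claim_equal_sort_divisible_by_3 := by
  intro arr _
  unfold Spec_sort_divisible_by_3 sort_divisible_by_3 sort_divisible_by_3_alt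
  rw [sorted_key3]
  simp only [PySem.List.foldl_append_if_eq_filter, PySem.List.foldl_append_singleton_eq_map,
    List.nil_append, List.map_append]
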